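-- pv_equiv track=rewrite | github.com/Shobhit28/workspan | deep_copy.py | entities_to_be_copied
-- ===== SOURCE A (Python) =====
-- def entities_to_be_copied(adj_list, entity_id, visited, entity_list, entity_details):
--     """
--     :param adj_list: adjacency list populated from links
--     :param entity_id: the id for which we need to visit its edges
--     :param visited: a map to keep track the vertices that are visited in a dfs
--     :param entity_list: list of entities that are reachable from entity_id, initially empty
--     :param entity_details: the details map created before
--     :return: list of entities reachable from entity_id
--     """
--     visited[entity_id] = True
--     if entity_id in adj_list:
--         for edge in adj_list[entity_id]:
--             if edge not in visited or not visited[edge]: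
--                 entities_to_be_copied(adj_list, edge, visited, entity_list, entity_details)
--     entity_list.append(entity_id)
--     return entity_list[::-1]
-- ===== SOURCE B (Python) =====
-- def entities_to_be_copied(adj_list, entity_id, visited, entity_list, entity_details):
--     """Iterative DFS with an explicit stack of (node, child-iterator) frames
--     instead of recursion; same mutations of visited/entity_list as the
--     recursive version, same return value."""
--     visited[entity_id] = True
--     stack = [(entity_id, iter(adj_list.get(entity_id, [])))]
--     while stack:
--         node, it = stack[-1]
--         for edge in it:
--             if edge not in visited or not visited[edge]:
--                 visited[edge] = True
--                 stack.append((edge, iter(adj_list.get(edge, []))))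
--                 break
--         else:
--             entity_list.append(node)
--             stack.pop()
--     return entity_list[::-1]
-- ===== Notes on version B (the rewrite author's own statement) =====
-- stated objective: alternative
-- what changed: Replaces the recursive DFS with an iterative DFS driven by an explicit stack of (node, child-iterator) frames, marking nodes visited at push time and emitting a node when its frame is exhausted; same mutations and return value, no recursion-depth limit.
import Mathlib
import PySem

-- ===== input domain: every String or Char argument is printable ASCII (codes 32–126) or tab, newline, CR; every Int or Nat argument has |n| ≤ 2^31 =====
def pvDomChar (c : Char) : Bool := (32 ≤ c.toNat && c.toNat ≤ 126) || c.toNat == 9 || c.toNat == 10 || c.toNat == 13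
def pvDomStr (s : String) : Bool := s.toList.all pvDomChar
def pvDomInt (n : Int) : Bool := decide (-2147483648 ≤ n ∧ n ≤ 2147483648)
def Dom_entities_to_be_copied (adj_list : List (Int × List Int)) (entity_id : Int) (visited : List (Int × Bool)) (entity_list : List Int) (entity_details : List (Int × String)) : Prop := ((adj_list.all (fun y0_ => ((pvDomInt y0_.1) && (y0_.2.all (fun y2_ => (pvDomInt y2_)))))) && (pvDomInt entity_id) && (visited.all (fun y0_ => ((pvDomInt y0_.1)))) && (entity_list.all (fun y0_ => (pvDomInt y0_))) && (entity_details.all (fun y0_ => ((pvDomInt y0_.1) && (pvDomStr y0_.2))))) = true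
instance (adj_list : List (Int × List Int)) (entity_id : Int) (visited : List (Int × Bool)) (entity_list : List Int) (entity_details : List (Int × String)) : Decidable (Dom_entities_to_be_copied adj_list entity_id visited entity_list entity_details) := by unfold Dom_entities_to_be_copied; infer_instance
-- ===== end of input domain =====

-- B replaces A's recursive DFS by an iterative DFS over an explicit stack of (node, remaining-children)
-- frames (same return value; both Pythons mutate visited/entity_list identically, equivalence here is
-- about the return value).

-- ===== PORT A =====
-- all edge values occurring in the adjacency dict (used only as a fuel / termination bound)
def pvAllEdges (adj_list : List (Int × List Int)) : List Int := adj_list.flatMap (·.2)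

-- mutual recursion = A's `entities_to_be_copied` body: the recursive call and the `for edge` loop.
-- `fuel` is only a totality guard; the top level passes enough fuel that the 0 case is never reached.
mutual
def pvDfsA (adj_list : List (Int × List Int)) (fuel : Nat) (node : Int)
    (v : PySem.Dict Int Bool) (l : List Int) : PySem.Dict Int Bool × List Int :=
  match fuel with
  | 0 => (v, l)
  | Nat.succ f =>
    -- visited[entity_id] = True
    let v1 := v.insert node true
    -- if entity_id in adj_list: for edge in adj_list[entity_id]: ...
    let p :=
      match (PySem.Dict.mk adj_list).get? node with
      | some edges => pvLoopA adj_list f edges v1 l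
      | none => (v1, l)
    -- entity_list.append(entity_id)
    (p.1, p.2 ++ [node])
  termination_by (fuel, 0)

def pvLoopA (adj_list : List (Int × List Int)) (fuel : Nat) (edges : List Int)
    (v : PySem.Dict Int Bool) (l : List Int) : PySem.Dict Int Bool × List Int :=
  match edges with
  | [] => (v, l)
  | e :: rest =>
    -- if edge not in visited or not visited[edge]: recurse
    let p := if v.get? e ≠ some true then pvDfsA adj_list fuel e v l else (v, l)
    pvLoopA adj_list fuel rest p.1 p.2
  termination_by (fuel, edges.length + 1)
end

def entities_to_be_copied (adj_list : List (Int × List Int)) (entity_id : Int) (visited : List (Int × Bool)) (entity_list : List Int) (entity_details : List (Int × String)) : List Int :=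
  -- return entity_list[::-1]  (xs[::-1] is exactly List.reverse)
  ((pvDfsA adj_list ((pvAllEdges adj_list).length + 2) entity_id (PySem.Dict.mk visited) entity_list).2).reverse

-- ===== PORT B =====
-- adj_list.get(node, [])
def pvCh (adj_list : List (Int × List Int)) (node : Int) : List Int :=
  ((PySem.Dict.mk adj_list).get? node).getD []

-- children lists always come from the dict, hence lie inside pvAllEdges (termination bookkeeping)
theorem pvCh_sublist (adj_list : List (Int × List Int)) (node : Int) :
    (pvCh adj_list node).Sublist (pvAllEdges adj_list) := by
  induction adj_list with
  | nil => simp [pvCh, pvAllEdges, PySem.Dict.get?]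
  | cons p rest ih =>
    simp only [pvCh, pvAllEdges, List.flatMap_cons] at *
    rw [PySem.Dict.get?_mk_cons]
    by_cases h : p.1 == node
    · simp [h]
    · simp only [h]
      exact ih.trans (List.sublist_append_right _ _)

def pvFrameWeight (stack : List (Int × List Int)) : Nat := (stack.map (fun fr => fr.2.length + 1)).sum

-- nodes not yet marked True among all edges of the graph and of the stack frames (termination measure)
def pvUnvisited (adj_list : List (Int × List Int)) (stack : List (Int × List Int))
    (v : PySem.Dict Int Bool) : Nat :=
  ((pvAllEdges adj_list ++ stack.flatMap (·.2)).toFinset.filter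
    (fun n => ¬ v.get? n = some true)).card

theorem pvFilterCard_mono {b1 b2 : List Int} {p : Int → Prop} [DecidablePred p]
    (h : ∀ x ∈ b1, x ∈ b2) :
    (b1.toFinset.filter p).card ≤ (b2.toFinset.filter p).card :=
  Finset.card_le_card (Finset.filter_subset_filter _ (by intro x hx; simp only [List.mem_toFinset] at *; exact h x hx))

-- strict decrease when pushing an unvisited edge e (it gets marked True)
theorem pvUnvisited_push (adj_list : List (Int × List Int)) (node e : Int)
    (tl : List Int) (rest : List (Int × List Int)) (v : PySem.Dict Int Bool)
    (he : ¬ v.get? e = some true) :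
    pvUnvisited adj_list ((e, pvCh adj_list e) :: (node, tl) :: rest) (v.insert e true) <
      pvUnvisited adj_list ((node, e :: tl) :: rest) v := by
  unfold pvUnvisited
  have heT : e ∈ ((pvAllEdges adj_list ++ ((node, e :: tl) :: rest).flatMap (·.2)).toFinset.filter
      (fun n => ¬ v.get? n = some true)) := by
    simp [List.mem_toFinset, he]
  apply Nat.lt_of_le_of_lt (m := ((pvAllEdges adj_list ++ ((node, e :: tl) :: rest).flatMap (·.2)).toFinset.filter
      (fun n => ¬ v.get? n = some true)).card - 1)
  · have hsub : ((pvAllEdges adj_list ++ ((e, pvCh adj_list e) :: (node, tl) :: rest).flatMap (·.2)).toFinset.filter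
        (fun n => ¬ (v.insert e true).get? n = some true)) ⊆
      ((pvAllEdges adj_list ++ ((node, e :: tl) :: rest).flatMap (·.2)).toFinset.filter
        (fun n => ¬ v.get? n = some true)).erase e := by
      intro x hx
      simp only [Finset.mem_filter, List.mem_toFinset, List.mem_append, List.flatMap_cons,
        List.mem_cons] at hx
      obtain ⟨hmem, hp⟩ := hx
      have hxe : x ≠ e := by
        intro h; rw [h] at hp; exact hp (by simp [PySem.Dict.get?_insert_self])
      rw [Finset.mem_erase]
      refine ⟨hxe, ?_⟩
      simp only [Finset.mem_filter, List.mem_toFinset, List.mem_append, List.flatMap_cons,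
        List.mem_cons]
      refine ⟨?_, by rwa [PySem.Dict.get?_insert_of_ne v true hxe] at hp⟩
      have hch : x ∈ pvCh adj_list e → x ∈ pvAllEdges adj_list :=
        fun hh => (pvCh_sublist adj_list e).subset hh
      tauto
    calc _ ≤ (((pvAllEdges adj_list ++ ((node, e :: tl) :: rest).flatMap (·.2)).toFinset.filter
          (fun n => ¬ v.get? n = some true)).erase e).card := Finset.card_le_card hsub
      _ = _ := Finset.card_erase_of_mem heT
  · exact Nat.sub_lt (Finset.card_pos.mpr ⟨e, heT⟩) Nat.one_pos

-- weak decrease when skipping an already-visited edge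
theorem pvUnvisited_skip (adj_list : List (Int × List Int)) (node e : Int)
    (tl : List Int) (rest : List (Int × List Int)) (v : PySem.Dict Int Bool) :
    pvUnvisited adj_list ((node, tl) :: rest) v ≤
      pvUnvisited adj_list ((node, e :: tl) :: rest) v := by
  unfold pvUnvisited
  apply pvFilterCard_mono
  intro x hx
  simp only [List.mem_append, List.flatMap_cons, List.mem_cons] at *
  tauto

theorem pvCh_len_le (adj_list : List (Int × List Int)) (e : Int) :
    (pvCh adj_list e).length ≤ (pvAllEdges adj_list).length :=
  (pvCh_sublist adj_list e).length_le

-- Source B: while stack: peek the top frame, advance its iterator; push-and-mark unvisited edges,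
-- append the node and pop when the iterator is exhausted.
def pvRunB (adj_list : List (Int × List Int)) (stack : List (Int × List Int))
    (v : PySem.Dict Int Bool) (l : List Int) : List Int :=
  match stack with
  | [] => l
  | (node, edges) :: rest =>
    match edges with
    | [] => pvRunB adj_list rest v (l ++ [node])
    | e :: tl =>
      if v.get? e ≠ some true then
        pvRunB adj_list ((e, pvCh adj_list e) :: (node, tl) :: rest) (v.insert e true) l
      else
        pvRunB adj_list ((node, tl) :: rest) v l
  termination_by pvUnvisited adj_list stack v * ((pvAllEdges adj_list).length + 2) + pvFrameWeight stack
  decreasing_by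
  · -- pop: same edge multiset, weight decreases
    have hU : pvUnvisited adj_list rest v ≤ pvUnvisited adj_list ((node, []) :: rest) v := by
      unfold pvUnvisited; simp
    have := Nat.mul_le_mul_right ((pvAllEdges adj_list).length + 2) hU
    simp only [pvFrameWeight, List.map_cons, List.sum_cons, List.length_cons]
    omega
  · -- push: unvisited count strictly decreases, weight grows by at most |allEdges|
    rename_i he
    have hU := pvUnvisited_push adj_list node e tl rest v (by simpa using he)
    have hW : (pvCh adj_list e).length ≤ (pvAllEdges adj_list).length := pvCh_len_le adj_list e
    have hm : (pvUnvisited adj_list ((e, pvCh adj_list e) :: (node, tl) :: rest) (v.insert e true) + 1)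
        * ((pvAllEdges adj_list).length + 2)
        ≤ pvUnvisited adj_list ((node, e :: tl) :: rest) v * ((pvAllEdges adj_list).length + 2) :=
      Nat.mul_le_mul_right _ hU
    rw [Nat.succ_mul] at hm
    simp only [pvFrameWeight, List.map_cons, List.sum_cons, List.length_cons] at *
    omega
  · -- skip: unvisited count weakly decreases, weight decreases
    have hU := pvUnvisited_skip adj_list node e tl rest v
    have := Nat.mul_le_mul_right ((pvAllEdges adj_list).length + 2) hU
    simp only [pvFrameWeight, List.map_cons, List.sum_cons, List.length_cons]
    omega

def entities_to_be_copied_alt (adj_list : List (Int × List Int)) (entity_id : Int) (visited : List (Int × Bool)) (entity_list : List Int) (entity_details : List (Int × String)) : List Int :=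
  -- visited[entity_id] = True; stack = [(entity_id, iter(adj_list.get(entity_id, [])))]
  (pvRunB adj_list [(entity_id, pvCh adj_list entity_id)]
    ((PySem.Dict.mk visited).insert entity_id true) entity_list).reverse

-- ===== PRECONDITION & SPEC =====
def Spec_entities_to_be_copied (adj_list : List (Int × List Int)) (entity_id : Int) (visited : List (Int × Bool)) (entity_list : List Int) (entity_details : List (Int × String)) (out : List Int) : Prop := out = entities_to_be_copied_alt adj_list entity_id visited entity_list entity_details
instance (adj_list : List (Int × List Int)) (entity_id : Int) (visited : List (Int × Bool)) (entity_list : List Int) (entity_details : List (Int × String)) (out : List Int) : Decidable (Spec_entities_to_be_copied adj_list entity_id visited entity_list entity_details out) := by unfold Spec_entities_to_be_copied; infer_instance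

-- ===== CLAIM (what is proved, stated in full; the proofs are below) =====
def Claim_equal_entities_to_be_copied : Prop := ∀ (adj_list : List (Int × List Int)) (entity_id : Int) (visited : List (Int × Bool)) (entity_list : List Int) (entity_details : List (Int × String)), Dom_entities_to_be_copied adj_list entity_id visited entity_list entity_details → Spec_entities_to_be_copied adj_list entity_id visited entity_list entity_details (entities_to_be_copied adj_list entity_id visited entity_list entity_details)

-- ===== LEMMAS AND PROOFS =====

-- unvisited count of the graph's own edges under a visited map (proof-side measure)
def pvUnv (adj_list : List (Int × List Int)) (v : PySem.Dict Int Bool) : Nat :=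
  ((pvAllEdges adj_list).toFinset.filter (fun n => ¬ v.get? n = some true)).card

theorem pvInsert_grow (v : PySem.Dict Int Bool) (e k : Int) (hk : v.get? k = some true) :
    (v.insert e true).get? k = some true := by
  by_cases h : k = e
  · subst h; exact PySem.Dict.get?_insert_self v k true
  · rw [PySem.Dict.get?_insert_of_ne v true h]; exact hk

-- the visited map only grows through A's loop and recursion
theorem pvGrow (adj_list : List (Int × List Int)) : ∀ fuel : Nat,
    (∀ (node : Int) v l k, v.get? k = some true → ((pvDfsA adj_list fuel node v l).1).get? k = some true) ∧
    (∀ (edges : List Int) v l k, v.get? k = some true → ((pvLoopA adj_list fuel edges v l).1).get? k = some true) := by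
  intro fuel
  induction fuel with
  | zero =>
    have hdfs : ∀ (node : Int) v l k, v.get? k = some true →
        ((pvDfsA adj_list 0 node v l).1).get? k = some true := by
      intro node v l k hk; rw [pvDfsA]; exact hk
    refine ⟨hdfs, ?_⟩
    intro edges
    induction edges with
    | nil => intro v l k hk; rw [pvLoopA]; exact hk
    | cons e rest ih =>
      intro v l k hk
      rw [pvLoopA]
      by_cases hc : v.get? e ≠ some true
      · rw [if_pos hc]
        exact ih _ _ _ (hdfs _ _ _ _ hk)
      · rw [if_neg hc]
        exact ih _ _ _ hk
  | succ f ihf =>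
    have hdfs : ∀ (node : Int) v l k, v.get? k = some true →
        ((pvDfsA adj_list (f + 1) node v l).1).get? k = some true := by
      intro node v l k hk
      rw [pvDfsA]
      cases hm : (PySem.Dict.mk adj_list).get? node with
      | some edges => exact ihf.2 edges _ _ _ (pvInsert_grow v node k hk)
      | none => exact pvInsert_grow v node k hk
    refine ⟨hdfs, ?_⟩
    intro edges
    induction edges with
    | nil => intro v l k hk; rw [pvLoopA]; exact hk
    | cons e rest ih =>
      intro v l k hk
      rw [pvLoopA]
      by_cases hc : v.get? e ≠ some true
      · rw [if_pos hc]
        exact ih _ _ _ (hdfs _ _ _ _ hk)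
      · rw [if_neg hc]
        exact ih _ _ _ hk

theorem pvUnv_mono (adj_list : List (Int × List Int)) {v v' : PySem.Dict Int Bool}
    (h : ∀ k, v.get? k = some true → v'.get? k = some true) :
    pvUnv adj_list v' ≤ pvUnv adj_list v := by
  unfold pvUnv
  apply Finset.card_le_card
  intro x hx
  simp only [Finset.mem_filter] at *
  exact ⟨hx.1, fun hv => hx.2 (h x hv)⟩

theorem pvUnv_insert_lt (adj_list : List (Int × List Int)) (v : PySem.Dict Int Bool) (e : Int)
    (heA : e ∈ pvAllEdges adj_list) (he : ¬ v.get? e = some true) :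
    pvUnv adj_list (v.insert e true) < pvUnv adj_list v := by
  unfold pvUnv
  have heT : e ∈ ((pvAllEdges adj_list).toFinset.filter (fun n => ¬ v.get? n = some true)) := by
    simp [List.mem_toFinset, heA, he]
  have hsub : ((pvAllEdges adj_list).toFinset.filter
      (fun n => ¬ (v.insert e true).get? n = some true)) ⊆
      ((pvAllEdges adj_list).toFinset.filter (fun n => ¬ v.get? n = some true)).erase e := by
    intro x hx
    simp only [Finset.mem_filter, List.mem_toFinset] at hx
    obtain ⟨hmem, hp⟩ := hx
    have hxe : x ≠ e := by
      intro h; rw [h] at hp; exact hp (by simp [PySem.Dict.get?_insert_self])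
    rw [Finset.mem_erase]
    refine ⟨hxe, ?_⟩
    simp only [Finset.mem_filter, List.mem_toFinset]
    exact ⟨hmem, by rwa [PySem.Dict.get?_insert_of_ne v true hxe] at hp⟩
  calc _ ≤ (((pvAllEdges adj_list).toFinset.filter
        (fun n => ¬ v.get? n = some true)).erase e).card := Finset.card_le_card hsub
    _ = _ - 1 := Finset.card_erase_of_mem heT
    _ < _ := Nat.sub_lt (Finset.card_pos.mpr ⟨e, heT⟩) Nat.one_pos

-- pvDfsA at positive fuel, written through pvCh (the two get? branches collapse)
theorem pvDfsA_succ_eq (adj_list : List (Int × List Int)) (f : Nat) (e : Int)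
    (v : PySem.Dict Int Bool) (l : List Int) :
    pvDfsA adj_list (f + 1) e v l =
      ((pvLoopA adj_list f (pvCh adj_list e) (v.insert e true) l).1,
       (pvLoopA adj_list f (pvCh adj_list e) (v.insert e true) l).2 ++ [e]) := by
  rw [pvDfsA]
  unfold pvCh
  cases hm : (PySem.Dict.mk adj_list).get? e with
  | some edges => simp
  | none => simp [pvLoopA]

-- core simulation: one stack frame of B computes A's inner loop followed by the append-and-pop
theorem pvSim (adj_list : List (Int × List Int)) : ∀ (n : Nat) (edges : List Int) (fuel : Nat)
    (node : Int) (v : PySem.Dict Int Bool) (l : List Int) (K : List (Int × List Int)),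
    pvUnv adj_list v ≤ n → pvUnv adj_list v < fuel →
    (∀ e ∈ edges, e ∈ pvAllEdges adj_list) →
    pvRunB adj_list ((node, edges) :: K) v l =
      pvRunB adj_list K (pvLoopA adj_list fuel edges v l).1
        ((pvLoopA adj_list fuel edges v l).2 ++ [node]) := by
  intro n
  induction n with
  | zero =>
    intro edges
    induction edges with
    | nil =>
      intro fuel node v l K h1 h2 h3
      rw [pvLoopA, pvRunB]
    | cons e rest ih =>
      intro fuel node v l K h1 h2 h3
      by_cases hc : v.get? e ≠ some true
      · -- impossible: e is an unvisited graph edge, so pvUnv v ≥ 1 > 0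
        exfalso
        have : e ∈ ((pvAllEdges adj_list).toFinset.filter (fun x => ¬ v.get? x = some true)) := by
          simp [List.mem_toFinset, h3 e (List.mem_cons_self), hc]
        have := Finset.card_pos.mpr ⟨e, this⟩
        unfold pvUnv at h1; omega
      · rw [pvRunB]
        rw [if_neg hc]
        rw [pvLoopA, if_neg hc]
        exact ih fuel node v l K h1 h2 (fun x hx => h3 x (List.mem_cons_of_mem _ hx))
  | succ m ihn =>
    intro edges
    induction edges with
    | nil =>
      intro fuel node v l K h1 h2 h3
      rw [pvLoopA, pvRunB]
    | cons e rest ih =>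
      intro fuel node v l K h1 h2 h3
      by_cases hc : v.get? e ≠ some true
      · have heA : e ∈ pvAllEdges adj_list := h3 e (List.mem_cons_self)
        have hlt : pvUnv adj_list (v.insert e true) < pvUnv adj_list v :=
          pvUnv_insert_lt adj_list v e heA hc
        obtain ⟨f, rfl⟩ : ∃ f, fuel = f + 1 := ⟨fuel - 1, by omega⟩
        -- B pushes (e, children e) and marks e; by IH that frame computes the recursive call
        rw [pvRunB, if_pos hc]
        rw [ihn (pvCh adj_list e) f e (v.insert e true) l ((node, rest) :: K)
          (by omega) (by omega)
          (fun x hx => (pvCh_sublist adj_list e).subset hx)]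
        -- then the parent frame resumes with the rest of the edges
        have hgrow : ∀ k, v.get? k = some true →
            ((pvLoopA adj_list f (pvCh adj_list e) (v.insert e true) l).1).get? k = some true :=
          fun k hk => (pvGrow adj_list f).2 _ _ _ _ (pvInsert_grow v e k hk)
        have hmono : pvUnv adj_list (pvLoopA adj_list f (pvCh adj_list e) (v.insert e true) l).1 ≤
            pvUnv adj_list (v.insert e true) :=
          pvUnv_mono adj_list (fun k hk => (pvGrow adj_list f).2 _ _ _ _ hk)
        rw [ihn rest (f + 1) node _ _ K (by omega) (by omega)
          (fun x hx => h3 x (List.mem_cons_of_mem _ hx))]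
        -- A's loop takes the same recursive step
        rw [pvLoopA, if_pos hc, pvDfsA_succ_eq]
      · rw [pvRunB, if_neg hc, pvLoopA, if_neg hc]
        exact ih fuel node v l K (by omega) h2
          (fun x hx => h3 x (List.mem_cons_of_mem _ hx))

-- ===== VERDICT (by name: the statement is the Claim_ definition above) =====
theorem entities_to_be_copied_spec : Claim_equal_entities_to_be_copied := by
  intro adj_list entity_id visited entity_list entity_details _
  unfold Spec_entities_to_be_copied entities_to_be_copied entities_to_be_copied_alt
  rw [pvDfsA_succ_eq]
  have hbound : pvUnv adj_list (PySem.Dict.mk visited) ≤ (pvAllEdges adj_list).length := by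
    unfold pvUnv
    calc _ ≤ (pvAllEdges adj_list).toFinset.card := Finset.card_filter_le _ _
      _ ≤ _ := List.toFinset_card_le _
  have h1 : pvUnv adj_list ((PySem.Dict.mk visited).insert entity_id true) ≤
      pvUnv adj_list (PySem.Dict.mk visited) :=
    pvUnv_mono adj_list (fun k hk => pvInsert_grow _ entity_id k hk)
  rw [pvSim adj_list (pvUnv adj_list ((PySem.Dict.mk visited).insert entity_id true))
    (pvCh adj_list entity_id) ((pvAllEdges adj_list).length + 1) entity_id _ entity_list []
    le_rfl (by omega) (fun x hx => (pvCh_sublist adj_list entity_id).subset hx)]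
  rw [pvRunB]
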